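-- pv_equiv track=rewrite | github.com/sorinpintilie-lgtm/sebdental | extract_products_from_pdf.py | dedupe_products
-- ===== SOURCE A (Python) =====
-- def dedupe_products(products):
--     by_code = {}
--     for p in products:
--         code = p["product_code"]
--         if code not in by_code:
--             by_code[code] = p
--             continue
--
--         # Merge metadata, preferring non-null values.
--         merged = dict(by_code[code])
--         for key, value in p.items():
--             if merged.get(key) is None and value is not None:
--                 merged[key] = value
--
--         # Prefer record with image if one exists.
--         if merged.get("image_file") is None and p.get("image_file") is not None:
--             merged["image_file"] = p["image_file"]
--
--         by_code[code] = merged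
--
--     return sorted(by_code.values(), key=lambda x: x["product_code"])
-- ===== SOURCE B (Python) =====
-- def _merge(base, extra):
--     merged = {k: (v if v is not None else extra.get(k)) for k, v in base.items()}
--     for k, v in extra.items():
--         if k not in merged and v is not None:
--             merged[k] = v
--     return merged
--
--
-- def dedupe_products(products):
--     groups = {}
--     for p in products:
--         groups.setdefault(p["product_code"], []).append(p)
--     deduped = []
--     for group in groups.values():
--         acc = group[0]
--         for extra in group[1:]:
--             acc = _merge(acc, extra)
--         deduped.append(acc)
--     return sorted(deduped, key=lambda r: r["product_code"])
-- ===== Notes on version B (the rewrite author's own statement) =====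
-- stated objective: alternative
-- what changed: A's single interleaved pass that merges each record into by_code as it goes is replaced by a build-then-fold decomposition: one grouping pass collecting all records per product_code, then a separate reduction of each group with a comprehension-based merge helper (which also drops A's redundant image_file branch), then the sort.
import Mathlib
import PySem

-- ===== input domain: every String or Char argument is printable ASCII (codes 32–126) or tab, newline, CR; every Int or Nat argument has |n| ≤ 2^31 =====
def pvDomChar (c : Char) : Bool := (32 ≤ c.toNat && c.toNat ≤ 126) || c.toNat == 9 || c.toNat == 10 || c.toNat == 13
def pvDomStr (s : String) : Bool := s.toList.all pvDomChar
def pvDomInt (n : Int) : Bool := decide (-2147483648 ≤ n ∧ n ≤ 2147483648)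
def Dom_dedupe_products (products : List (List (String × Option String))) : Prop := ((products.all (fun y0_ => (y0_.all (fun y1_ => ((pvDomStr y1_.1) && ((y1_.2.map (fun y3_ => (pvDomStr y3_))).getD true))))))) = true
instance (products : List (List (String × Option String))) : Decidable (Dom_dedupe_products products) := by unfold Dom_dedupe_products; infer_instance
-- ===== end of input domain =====

-- B replaces A's single interleaved merge-into-dict pass by a build-then-fold decomposition
-- (group records by code, then reduce each group with a merge helper); same asymptotic cost ("alternative").

-- A record is a Python dict str -> Optional[str]; each assoc-list argument is marshalled once
-- through PySem.Dict.ofList (= dict(pairs)) in BOTH ports, and dicts are un-marshalled with .items.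
abbrev PRec := PySem.Dict String (Option String)

-- ===== PORT A =====
-- inner merge of A's loop body: merged = dict(by_code[code]); fill None fields from p; image_file branch
def pvMergeA (m p : PRec) : PRec :=
  let merged := p.items.foldl (fun acc kv =>
      if acc.getD kv.1 none = none ∧ kv.2 ≠ none then acc.insert kv.1 kv.2 else acc) m
  -- p["image_file"] cannot raise here: the guard has p.get("image_file") is not None
  if merged.getD "image_file" none = none ∧ p.getD "image_file" none ≠ none then
    merged.insert "image_file" (p.getD "image_file" none)
  else merged

def dedupe_products (products : List (List (String × Option String))) : List (List (String × Option String)) :=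
  let recs := products.map (fun r => PySem.Dict.ofList r)
  let by_code := recs.foldl (fun d p =>
      -- p["product_code"]: KeyError (missing key) is excluded by Pre_; getD none is exact on Pre_
      let code := p.getD "product_code" none
      if d.contains code = false then d.insert code p
      else d.insert code (pvMergeA (d.getD code PySem.Dict.empty) p)) PySem.Dict.empty
  -- sorted(..., key=lambda x: x["product_code"]); WithBot String gives the comparisons Python
  -- performs on Pre_ (keys all some: String order; otherwise no comparison happens)
  (PySem.List.sorted by_code.values
      (fun x => show WithBot String from x.getD "product_code" none) false).map (fun d => d.items)

-- ===== PORT B =====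
-- _merge(base, extra): dict comprehension filling None values, then append extra's new non-None keys
def pvMergeB (base extra : PRec) : PRec :=
  let merged : PRec := PySem.Dict.mk
      (base.items.map (fun kv => (kv.1, if kv.2 ≠ none then kv.2 else extra.getD kv.1 none)))
  extra.items.foldl (fun acc kv =>
      if acc.contains kv.1 = false ∧ kv.2 ≠ none then acc.insert kv.1 kv.2 else acc) merged

-- acc = group[0]; for extra in group[1:]: acc = _merge(acc, extra)   (groups are never empty)
def pvReduce (g : List PRec) : PRec := g.tail.foldl pvMergeB (g.headD PySem.Dict.empty)

def dedupe_products_alt (products : List (List (String × Option String))) : List (List (String × Option String)) :=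
  let recs := products.map (fun r => PySem.Dict.ofList r)
  -- groups.setdefault(p["product_code"], []).append(p)  =  d[code] = d.get(code, []) + [p]
  let groups : PySem.Dict (Option String) (List PRec) := recs.foldl
      (fun d p => d.modify (p.getD "product_code" none) [] (fun l => l ++ [p])) PySem.Dict.empty
  let deduped := groups.values.map pvReduce
  (PySem.List.sorted deduped
      (fun x => show WithBot String from x.getD "product_code" none) false).map (fun d => d.items)

-- ===== PRECONDITION & SPEC =====
-- Pre_ excludes exactly the inputs where the Python raises: a record without a "product_code" key
-- (KeyError), and mixed None/str product codes, where sorted() compares None with str (TypeError).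
def Pre_dedupe_products (products : List (List (String × Option String))) : Prop :=
  (∀ r ∈ products, ((PySem.Dict.ofList r : PRec).get? "product_code").isSome = true) ∧
  ((∀ r ∈ products, ((PySem.Dict.ofList r : PRec).getD "product_code" none).isSome = true) ∨
   (∀ r ∈ products, (PySem.Dict.ofList r : PRec).getD "product_code" none = none))
instance (products : List (List (String × Option String))) : Decidable (Pre_dedupe_products products) := by
  unfold Pre_dedupe_products; infer_instance

def pvWitness_dedupe_products : List (List (String × Option String)) :=
  [[("product_code", some "a"), ("name", none)],
   [("product_code", some "a"), ("name", some "x"), ("image_file", some "i.png")],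
   [("product_code", some "b")]]

def Spec_dedupe_products (products : List (List (String × Option String))) (out : List (List (String × Option String))) : Prop := out = dedupe_products_alt products
instance (products : List (List (String × Option String))) (out : List (List (String × Option String))) : Decidable (Spec_dedupe_products products out) := by unfold Spec_dedupe_products; infer_instance

-- ===== CLAIM (what is proved, stated in full; the proofs are below) =====
def Claim_equal_dedupe_products : Prop := ∀ (products : List (List (String × Option String))), Dom_dedupe_products products → Pre_dedupe_products products → Spec_dedupe_products products (dedupe_products products)

-- ===== LEMMAS AND PROOFS =====

-- first-match lookup in a pair list (what dict.get computes on the items list)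
def pvLook (L : List (String × Option String)) (k : String) : Option String :=
  ((L.find? (fun kv => kv.1 == k)).map (·.2)).getD none

-- common normal form of both merge helpers
def pvMergeC (m p : PRec) : PRec :=
  PySem.Dict.mk
    (m.items.map (fun kv => (kv.1, kv.2.or (p.getD kv.1 none))) ++
     p.items.filter (fun kv => !(m.contains kv.1) && kv.2.isSome))

theorem pvModify_eq_insert {κ ν : Type} [BEq κ] (d : PySem.Dict κ ν) (k : κ) (d0 : ν) (f : ν → ν) :
    d.modify k d0 f = d.insert k (f (d.getD k d0)) := rfl

-- characterisation of A's inner fill loop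
theorem pvLook_cons (kv : String × Option String) (L : List (String × Option String)) (j : String) :
    pvLook (kv :: L) j = if kv.1 == j then kv.2 else pvLook L j := by
  cases h : (kv.1 == j) with
  | true => simp [pvLook, List.find?_cons_of_pos, h]
  | false => simp [pvLook, List.find?_cons_of_neg, h]

theorem pvLook_eq_none_of_not_mem (L : List (String × Option String)) (j : String)
    (h : j ∉ L.map Prod.fst) : pvLook L j = none := by
  unfold pvLook
  rw [List.find?_eq_none.2]
  · rfl
  · intro kv hkv
    simp only [beq_iff_eq]
    intro he; exact h (he ▸ List.mem_map_of_mem hkv)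

theorem pvFoldA_eq (L : List (String × Option String)) (m : PRec)
    (hm : m.keys.Nodup) (hL : (L.map Prod.fst).Nodup) :
    L.foldl (fun acc kv =>
        if acc.getD kv.1 none = none ∧ kv.2 ≠ none then acc.insert kv.1 kv.2 else acc) m =
      PySem.Dict.mk
        (m.items.map (fun kv => (kv.1, kv.2.or (pvLook L kv.1))) ++
         L.filter (fun kv => !(m.contains kv.1) && kv.2.isSome)) := by
  induction L generalizing m with
  | nil =>
      apply PySem.Dict.ext
      simp [pvLook]
  | cons kv L' ih =>
      have hL' : (L'.map Prod.fst).Nodup := (List.nodup_cons.1 hL).2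
      have hnotin : kv.1 ∉ L'.map Prod.fst := (List.nodup_cons.1 hL).1
      simp only [List.foldl_cons, List.filter_cons]
      by_cases h1 : m.getD kv.1 none = none ∧ kv.2 ≠ none
      · rw [if_pos h1]
        by_cases hc : m.contains kv.1 = true
        · -- kv.1 already a key of m, stored value must be none; insert overwrites in place
          have hm' : (m.insert kv.1 kv.2).keys.Nodup := by
            rw [PySem.Dict.keys_insert_of_contains m kv.2 hc]; exact hm
          rw [ih (m.insert kv.1 kv.2) hm' hL']
          apply PySem.Dict.ext
          dsimp only
          rw [PySem.Dict.items_insert_of_contains m kv.2 hc]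
          have hmap : (m.items.map (fun q => if (q.1 == kv.1) = true then (kv.1, kv.2) else q)).map
                (fun q => (q.1, q.2.or (pvLook L' q.1))) =
              m.items.map (fun q => (q.1, q.2.or (pvLook (kv :: L') q.1))) := by
            rw [List.map_map]
            refine List.map_congr_left ?_
            intro q hq
            cases hb : (q.1 == kv.1) with
            | true =>
                have hq1 : q.1 = kv.1 := by simpa using hb
                have hq2 : q.2 = none := by
                  have := PySem.Dict.getD_of_mem_items m
                    (show (q.1, q.2) ∈ m.items by simpa using hq) hm none
                  rw [hq1] at this; rw [← this, h1.1]
                rcases hv : kv.2 with - | v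
                · exact absurd hv h1.2
                · simp [Function.comp, hq1, hq2, pvLook_cons, hv]
            | false =>
                have hne : ¬ (kv.1 = q.1) := fun he => by simp [he] at hb
                simp [hb, Function.comp, pvLook_cons, hne]
          rw [hmap]
          have hfc : ∀ x ∈ L',
              ((!(m.insert kv.1 kv.2).contains x.1) && x.2.isSome) =
              ((!m.contains x.1) && x.2.isSome) := by
            intro x hx
            have hne : (x.1 == kv.1) = false := by
              simp only [beq_eq_false_iff_ne, ne_eq]
              intro he; exact hnotin (he ▸ List.mem_map_of_mem hx)
            rw [PySem.Dict.contains_insert m kv.1 x.1 kv.2, hne, Bool.false_or]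
          rw [List.filter_congr hfc, if_neg (by simp [hc])]
        · -- new key: insert appends
          have hknot : kv.1 ∉ m.keys := by
            rw [PySem.Dict.contains_eq_decide_mem_keys] at hc; simpa using hc
          have hcf : m.contains kv.1 = false := by
            rw [PySem.Dict.contains_eq_decide_mem_keys]; simpa using hknot
          have hm' : (m.insert kv.1 kv.2).keys.Nodup := by
            rw [PySem.Dict.keys_insert_of_not_contains m kv.2 hcf]
            exact List.Nodup.append hm (List.nodup_singleton _)
              (by intro a ha hb; simp only [List.mem_singleton] at hb; exact hknot (hb ▸ ha))
          rw [ih (m.insert kv.1 kv.2) hm' hL']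
          apply PySem.Dict.ext
          dsimp only
          rw [PySem.Dict.items_insert_of_not_contains m kv.2 hcf, List.map_append]
          have hmap : m.items.map (fun q => (q.1, q.2.or (pvLook L' q.1))) =
              m.items.map (fun q => (q.1, q.2.or (pvLook (kv :: L') q.1))) := by
            refine List.map_congr_left ?_
            intro q hq
            have hne : (q.1 == kv.1) = false := by
              simp only [beq_eq_false_iff_ne, ne_eq]
              intro he
              exact hknot (he ▸ PySem.Dict.mem_keys_of_mem_items m hq)
            have hne' : ¬ (kv.1 = q.1) := fun he => by simp [he] at hne
            simp [pvLook_cons, hne']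
          rw [hmap]
          have hsingle : [(kv.1, kv.2)].map (fun q => (q.1, q.2.or (pvLook L' q.1))) = [kv] := by
            have h2 : kv.2.or (pvLook L' kv.1) = kv.2 := by
              rcases hv : kv.2 with - | v
              · exact absurd hv h1.2
              · rfl
            simp only [List.map_cons, List.map_nil, h2]
          rw [hsingle]
          have hfc : ∀ x ∈ L',
              ((!(m.insert kv.1 kv.2).contains x.1) && x.2.isSome) =
              ((!m.contains x.1) && x.2.isSome) := by
            intro x hx
            have hne : (x.1 == kv.1) = false := by
              simp only [beq_eq_false_iff_ne, ne_eq]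
              intro he; exact hnotin (he ▸ List.mem_map_of_mem hx)
            rw [PySem.Dict.contains_insert m kv.1 x.1 kv.2, hne, Bool.false_or]
          rw [List.filter_congr hfc,
            if_pos (by simp [hcf, Option.isSome_iff_ne_none, h1.2]), List.append_assoc]
          rfl
      · rw [if_neg h1, ih m hm hL']
        apply PySem.Dict.ext
        dsimp only
        have hmap : m.items.map (fun q => (q.1, q.2.or (pvLook L' q.1))) =
            m.items.map (fun q => (q.1, q.2.or (pvLook (kv :: L') q.1))) := by
          refine List.map_congr_left ?_
          intro q hq
          cases hb : (q.1 == kv.1) with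
          | true =>
              have hq1 : q.1 = kv.1 := by simpa using hb
              have hgd : m.getD kv.1 none = q.2 := by
                rw [← hq1]
                exact PySem.Dict.getD_of_mem_items m
                  (show (q.1, q.2) ∈ m.items by simpa using hq) hm none
              rcases hq2 : q.2 with - | w
              · -- stored none forces kv.2 = none (else h1 would have fired); both lookups give none
                have hv : kv.2 = none := by
                  by_contra hv
                  exact h1 ⟨by rw [hgd, hq2], hv⟩
                simp [pvLook_cons, hv, pvLook_eq_none_of_not_mem L' kv.1 hnotin, hq1]
              · simp [pvLook_cons]
          | false =>
              have hne : ¬ (kv.1 = q.1) := fun he => by simp [he] at hb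
              simp [pvLook_cons, hne]
        rw [hmap]
        have hhead : ((!m.contains kv.1) && kv.2.isSome) = false := by
          rcases not_and_or.1 h1 with h | h
          · have : m.contains kv.1 = true := by
              by_contra hcf
              exact h (PySem.Dict.getD_of_not_contains m none (by simpa using hcf))
            simp [this]
          · simp only [ne_eq, not_not] at h; simp [h]
        rw [if_neg (by simp [hhead])]

-- characterisation of B's append loop
theorem pvFoldB_eq (L : List (String × Option String)) (n : PRec)
    (hL : (L.map Prod.fst).Nodup) :
    L.foldl (fun acc kv =>
        if acc.contains kv.1 = false ∧ kv.2 ≠ none then acc.insert kv.1 kv.2 else acc) n =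
      PySem.Dict.mk (n.items ++ L.filter (fun kv => !(n.contains kv.1) && kv.2.isSome)) := by
  induction L generalizing n with
  | nil => apply PySem.Dict.ext; simp
  | cons kv L' ih =>
      have hL' : (L'.map Prod.fst).Nodup := (List.nodup_cons.1 hL).2
      have hnotin : kv.1 ∉ L'.map Prod.fst := (List.nodup_cons.1 hL).1
      simp only [List.foldl_cons, List.filter_cons]
      by_cases hc : n.contains kv.1 = false ∧ kv.2 ≠ none
      · rw [if_pos hc, ih (n.insert kv.1 kv.2) hL']
        apply PySem.Dict.ext
        dsimp only
        rw [PySem.Dict.items_insert_of_not_contains n kv.2 hc.1]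
        have hfc : ∀ x ∈ L',
            ((!(n.insert kv.1 kv.2).contains x.1) && x.2.isSome) =
            ((!n.contains x.1) && x.2.isSome) := by
          intro x hx
          have hne : (x.1 == kv.1) = false := by
            simp only [beq_eq_false_iff_ne, ne_eq]
            intro he; exact hnotin (he ▸ List.mem_map_of_mem hx)
          rw [PySem.Dict.contains_insert n kv.1 x.1 kv.2, hne, Bool.false_or]
        rw [List.filter_congr hfc]
        have hhead : ((!n.contains kv.1) && kv.2.isSome) = true := by
          rcases hc with ⟨h1, h2⟩
          simp [h1, Option.isSome_iff_ne_none, h2]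
        rw [if_pos hhead, List.append_assoc]
        rfl
      · rw [if_neg hc, ih n hL']
        have hhead : ((!n.contains kv.1) && kv.2.isSome) = false := by
          rcases not_and_or.1 hc with h | h
          · simp only [Bool.not_eq_false] at h; simp [h]
          · simp only [ne_eq, not_not] at h; simp [h]
        rw [if_neg (by simp [hhead])]

theorem pvMergeC_keys (m p : PRec) :
    (pvMergeC m p).keys =
      m.keys ++ (p.items.filter (fun kv => !(m.contains kv.1) && kv.2.isSome)).map Prod.fst := by
  show (PySem.Dict.mk _).keys = _
  rw [PySem.Dict.keys_mk, List.map_append, List.map_map]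
  rfl

theorem pvMergeC_nodup (m p : PRec) (hm : m.keys.Nodup) (hp : p.keys.Nodup) :
    (pvMergeC m p).keys.Nodup := by
  rw [pvMergeC_keys]
  refine List.Nodup.append hm ?_ ?_
  · exact hp.sublist (List.Sublist.map _ List.filter_sublist)
  · intro k hk1 hk2
    rcases List.mem_map.1 hk2 with ⟨kv, hkv, rfl⟩
    have hthis := (List.mem_filter.1 hkv).2
    simp only [Bool.and_eq_true] at hthis
    have hcf : m.contains kv.1 = false := by simpa using hthis.1
    rw [PySem.Dict.contains_eq_decide_mem_keys] at hcf
    simp only [decide_eq_false_iff_not] at hcf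
    exact hcf hk1

theorem pvMergeA_eq_C (m p : PRec) (hm : m.keys.Nodup) (hp : p.keys.Nodup) :
    pvMergeA m p = pvMergeC m p := by
  unfold pvMergeA
  rw [pvFoldA_eq p.items m hm hp]
  have hCeq : PySem.Dict.mk
      (m.items.map (fun kv => (kv.1, kv.2.or (pvLook p.items kv.1))) ++
       p.items.filter (fun kv => !(m.contains kv.1) && kv.2.isSome)) = pvMergeC m p := rfl
  rw [hCeq]
  -- the explicit image_file branch is subsumed by the generic None-fill: it can never fire
  have himg : ¬ ((pvMergeC m p).getD "image_file" none = none ∧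
      p.getD "image_file" none ≠ none) := by
    rintro ⟨hC, hp2⟩
    rcases hg : p.get? "image_file" with - | w
    · exact hp2 (by rw [PySem.Dict.getD_eq_get?_getD, hg]; rfl)
    · have hw : p.getD "image_file" none = w := by
        rw [PySem.Dict.getD_eq_get?_getD, hg]; rfl
      have hwne : w ≠ none := fun hn => hp2 (by rw [hw, hn])
      have hmem := PySem.Dict.mem_items_of_get?_eq_some p hg
      by_cases hk : m.contains "image_file" = true
      · obtain ⟨q, hq, hq1⟩ : ∃ q ∈ m.items, q.1 = "image_file" := by
          rw [PySem.Dict.contains_eq_decide_mem_keys] at hk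
          simp only [decide_eq_true_eq] at hk
          rcases List.mem_map.1 (show "image_file" ∈ m.items.map (fun x => x.1) from hk)
            with ⟨q, hq, hq1⟩
          exact ⟨q, hq, hq1⟩
        have hmm : (q.1, q.2.or (p.getD q.1 none)) ∈ (pvMergeC m p).items :=
          List.mem_append_left _ (List.mem_map.2 ⟨q, hq, rfl⟩)
        have hval := PySem.Dict.getD_of_mem_items (pvMergeC m p) hmm
          (pvMergeC_nodup m p hm hp) none
        rw [hq1, hC, hw] at hval
        rcases hq2 : q.2 with - | u
        · rw [hq2] at hval; exact hwne hval.symm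
        · rw [hq2] at hval; simp at hval
      · have hcf : m.contains "image_file" = false := by simpa using hk
        have hmm : ("image_file", w) ∈ (pvMergeC m p).items := by
          refine List.mem_append_right _ (List.mem_filter.2 ⟨hmem, ?_⟩)
          simp [hcf, Option.isSome_iff_ne_none, hwne]
        have hval := PySem.Dict.getD_of_mem_items (pvMergeC m p) hmm
          (pvMergeC_nodup m p hm hp) none
        rw [hC] at hval
        exact hwne hval.symm
  rw [if_neg himg]

theorem pvMergeB_eq_C (m p : PRec) (hp : p.keys.Nodup) :
    pvMergeB m p = pvMergeC m p := by
  unfold pvMergeB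
  rw [pvFoldB_eq p.items _ hp]
  apply PySem.Dict.ext
  have hkeys : (PySem.Dict.mk (m.items.map
      (fun kv => (kv.1, if kv.2 ≠ none then kv.2 else p.getD kv.1 none)))).keys = m.keys := by
    rw [PySem.Dict.keys_mk, List.map_map]; rfl
  have hfc : ∀ x ∈ p.items,
      ((!(PySem.Dict.mk (m.items.map
          (fun kv => (kv.1, if kv.2 ≠ none then kv.2 else p.getD kv.1 none)))).contains x.1) &&
        x.2.isSome) = ((!m.contains x.1) && x.2.isSome) := by
    intro x _
    rw [PySem.Dict.contains_eq_decide_mem_keys, PySem.Dict.contains_eq_decide_mem_keys, hkeys]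
  have hmap : m.items.map (fun kv => (kv.1, if kv.2 ≠ none then kv.2 else p.getD kv.1 none))
      = m.items.map (fun kv => (kv.1, kv.2.or (p.getD kv.1 none))) := by
    refine List.map_congr_left ?_
    intro q _
    rcases hq2 : q.2 with - | w <;> simp
  show (m.items.map (fun kv => (kv.1, if kv.2 ≠ none then kv.2 else p.getD kv.1 none))) ++ _ = _
  rw [List.filter_congr hfc, hmap]
  rfl

-- the loop invariant tying A's by_code to B's groups
def pvInv (d : PySem.Dict (Option String) PRec) (G : PySem.Dict (Option String) (List PRec)) : Prop :=
  d.items = G.items.map (fun cg => (cg.1, pvReduce cg.2)) ∧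
  G.keys.Nodup ∧
  ∀ cg ∈ G.items, cg.2 ≠ [] ∧ (∀ q ∈ cg.2, q.keys.Nodup) ∧ (pvReduce cg.2).keys.Nodup

theorem pvInv_step (d : PySem.Dict (Option String) PRec) (G : PySem.Dict (Option String) (List PRec))
    (p : PRec) (hp : p.keys.Nodup) (h : pvInv d G) :
    pvInv
      (let code := p.getD "product_code" none
       if d.contains code = false then d.insert code p
       else d.insert code (pvMergeA (d.getD code PySem.Dict.empty) p))
      (G.modify (p.getD "product_code" none) [] (fun l => l ++ [p])) := by
  obtain ⟨hitems, hnodup, hside⟩ := h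
  have hkeys : d.keys = G.keys := by
    show d.items.map (fun x => x.1) = G.items.map (fun x => x.1)
    rw [hitems, List.map_map]; rfl
  have hdnodup : d.keys.Nodup := hkeys ▸ hnodup
  rw [pvModify_eq_insert]
  dsimp only
  set c := p.getD "product_code" none with hc
  have hcont : d.contains c = G.contains c := by
    rw [PySem.Dict.contains_eq_decide_mem_keys, PySem.Dict.contains_eq_decide_mem_keys, hkeys]
  by_cases hGc : G.contains c = true
  · -- existing code: A merges into by_code[c]; B appends p to the group
    obtain ⟨cg, hcg, hcg1⟩ : ∃ cg ∈ G.items, cg.1 = c := by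
      rw [PySem.Dict.contains_eq_decide_mem_keys] at hGc
      simp only [decide_eq_true_eq] at hGc
      rcases List.mem_map.1 (show c ∈ G.items.map (fun x => x.1) from hGc) with ⟨cg, hcg, hcg1⟩
      exact ⟨cg, hcg, hcg1⟩
    obtain ⟨hne, hqnodup, hrnodup⟩ := hside cg hcg
    have hgetG : G.getD c [] = cg.2 := by
      rw [← hcg1]
      exact PySem.Dict.getD_of_mem_items G (by simpa using hcg) hnodup []
    have hdc : d.getD c PySem.Dict.empty = pvReduce cg.2 := by
      have hmem : (cg.1, pvReduce cg.2) ∈ d.items := by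
        rw [hitems]; exact List.mem_map.2 ⟨cg, hcg, rfl⟩
      rw [← hcg1]
      exact PySem.Dict.getD_of_mem_items d hmem hdnodup _
    have hdcT : d.contains c = true := by rw [hcont]; exact hGc
    rw [if_neg (by simp [hdcT])]
    have hred : pvReduce (cg.2 ++ [p]) = pvMergeB (pvReduce cg.2) p := by
      rcases hgg : cg.2 with - | ⟨a, g'⟩
      · exact absurd hgg hne
      · unfold pvReduce
        simp [List.foldl_append]
    have hmergeAB : pvMergeA (pvReduce cg.2) p = pvMergeB (pvReduce cg.2) p := by
      rw [pvMergeA_eq_C _ _ hrnodup hp, pvMergeB_eq_C _ _ hp]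
    refine ⟨?_, ?_, ?_⟩
    · rw [PySem.Dict.items_insert_of_contains d _ hdcT,
          PySem.Dict.items_insert_of_contains G _ hGc, hitems, List.map_map, List.map_map]
      refine List.map_congr_left ?_
      intro q hq
      cases hb : (q.1 == c) with
      | true =>
          have hq1 : q.1 = c := by simpa using hb
          have hq2 : q.2 = cg.2 := by
            have h1 := PySem.Dict.get?_of_mem_items G (show (q.1, q.2) ∈ G.items by simpa using hq) hnodup
            have h2 := PySem.Dict.get?_of_mem_items G (show (cg.1, cg.2) ∈ G.items by simpa using hcg) hnodup
            rw [hq1] at h1; rw [hcg1] at h2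
            rw [h1] at h2; exact Option.some_inj.1 h2
          simp only [Function.comp_apply, hb, if_pos, hgetG, hq2]
          rw [hdc, hmergeAB, ← hred]
      | false =>
          simp only [Function.comp_apply, hb]
          rfl
    · rw [PySem.Dict.keys_insert_of_contains G _ hGc]; exact hnodup
    · intro r hr
      rw [PySem.Dict.items_insert_of_contains G _ hGc] at hr
      rcases List.mem_map.1 hr with ⟨q, hq, rfl⟩
      cases hb : (q.1 == c) with
      | true =>
          simp only [if_pos, hgetG]
          refine ⟨by simp, ?_, ?_⟩
          · intro r hr
            rcases List.mem_append.1 hr with h | h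
            · exact hqnodup r h
            · simp only [List.mem_singleton] at h; subst h; exact hp
          · rw [hred, pvMergeB_eq_C _ _ hp]
            exact pvMergeC_nodup _ _ hrnodup hp
      | false =>
          simp only [Bool.false_eq_true, if_false]
          exact hside q hq
  · -- new code: both sides append a fresh entry
    have hGcf : G.contains c = false := by simpa using hGc
    have hdcf : d.contains c = false := by rw [hcont]; exact hGcf
    rw [if_pos hdcf]
    have hgetG : G.getD c [] = [] := PySem.Dict.getD_of_not_contains G [] hGcf
    refine ⟨?_, ?_, ?_⟩
    · rw [PySem.Dict.items_insert_of_not_contains d p hdcf,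
          PySem.Dict.items_insert_of_not_contains G _ hGcf, hitems, List.map_append, hgetG]
      rfl
    · rw [PySem.Dict.keys_insert_of_not_contains G _ hGcf]
      refine List.Nodup.append hnodup (List.nodup_singleton _) ?_
      intro a ha hb
      simp only [List.mem_singleton] at hb
      subst hb
      rw [PySem.Dict.contains_eq_decide_mem_keys] at hGcf
      simp only [decide_eq_false_iff_not] at hGcf
      exact hGcf ha
    · intro r hr
      rw [PySem.Dict.items_insert_of_not_contains G _ hGcf] at hr
      rcases List.mem_append.1 hr with h | h
      · exact hside r h
      · simp only [List.mem_singleton] at h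
        subst h
        rw [hgetG]
        refine ⟨by simp, ?_, ?_⟩
        · intro q hq
          simp only [List.nil_append, List.mem_singleton] at hq
          subst hq; exact hp
        · show (pvReduce ([] ++ [p])).keys.Nodup
          exact hp

theorem pvInv_fold (recs : List PRec) (d : PySem.Dict (Option String) PRec)
    (G : PySem.Dict (Option String) (List PRec))
    (hrecs : ∀ q ∈ recs, q.keys.Nodup) (h : pvInv d G) :
    pvInv
      (recs.foldl (fun d p =>
        let code := p.getD "product_code" none
        if d.contains code = false then d.insert code p
        else d.insert code (pvMergeA (d.getD code PySem.Dict.empty) p)) d)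
      (recs.foldl (fun d p => d.modify (p.getD "product_code" none) [] (fun l => l ++ [p])) G) := by
  induction recs generalizing d G with
  | nil => exact h
  | cons q recs ih =>
      simp only [List.foldl_cons]
      exact ih _ _ (fun r hr => hrecs r (List.mem_cons_of_mem _ hr))
        (pvInv_step d G q (hrecs q (List.mem_cons_self)) h)

-- ===== VERDICT (by name: the statement is the Claim_ definition above) =====
theorem dedupe_products_spec : Claim_equal_dedupe_products := by
  intro products _ _
  unfold Spec_dedupe_products dedupe_products dedupe_products_alt
  have hrecs : ∀ q ∈ products.map (fun r => (PySem.Dict.ofList r : PRec)), q.keys.Nodup := by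
    intro q hq
    rcases List.mem_map.1 hq with ⟨r, _, rfl⟩
    exact PySem.Dict.nodup_keys_ofList r
  have h := pvInv_fold (products.map (fun r => (PySem.Dict.ofList r : PRec)))
      PySem.Dict.empty PySem.Dict.empty hrecs (by
        refine ⟨rfl, PySem.Dict.nodup_keys_empty, ?_⟩
        intro cg hcg; cases hcg)
  rcases h with ⟨hitems, -, -⟩
  have hv : ∀ {ν : Type} (d : PySem.Dict (Option String) ν), d.values = d.items.map (·.2) :=
    fun _ => rfl
  have hvals :
      ((products.map (fun r => (PySem.Dict.ofList r : PRec))).foldl (fun d p =>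
        let code := p.getD "product_code" none
        if d.contains code = false then d.insert code p
        else d.insert code (pvMergeA (d.getD code PySem.Dict.empty) p)) PySem.Dict.empty).values =
      (((products.map (fun r => (PySem.Dict.ofList r : PRec))).foldl
        (fun d p => d.modify (p.getD "product_code" none) [] (fun l => l ++ [p]))
        PySem.Dict.empty).values).map pvReduce := by
    rw [hv, hv, hitems, List.map_map, List.map_map]; rfl
  dsimp only
  rw [hvals]
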